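-- pv_equiv track=rewrite | github.com/massibone/Python_Various_Problems | dividere8litri.py | divide_wine
-- ===== SOURCE A (Python) =====
-- def divide_wine(capacity1, capacity2, wine):
--     # Inizializziamo i contenitori
--     container1 = 0
--     container2 = 0
--
--     # Versiamo il vino nel grande recipiente
--     container1 = wine
--
--     # Se il contenitore da 5 litri è vuoto, lo riempiamo
--     if container2 == 0:
--         container2 = capacity2
--
--     # Versiamo il vino dal contenitore da 5 litri in quello da 3 litri finché non è pieno
--     while container2 > capacity1:
--         container2 -= 1
--         container1 += 1
--
--     # Versiamo il vino dal contenitore da 3 litri in quello da 5 litri finché non è pieno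
--     while container1 > capacity2:
--         container1 -= 1
--         container2 += 1
--
--     # Restituiamo la quantità di vino nei due contenitori
--     return container1, container2
-- ===== SOURCE B (Python) =====
-- def divide_wine(capacity1, capacity2, wine):
--     # Closed form: each unit-step loop transfers max(0, source - cap) at once.
--     t1 = max(0, capacity2 - capacity1)
--     c1 = wine + t1
--     c2 = capacity2 - t1
--     t2 = max(0, c1 - capacity2)
--     return c1 - t2, c2 + t2
-- ===== Notes on version B (the rewrite author's own statement) =====
-- stated objective: faster
-- what changed: Replaced both unit-step transfer while-loops by closed-form max(0, source - cap) arithmetic, computing the result in O(1).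
import Mathlib
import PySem

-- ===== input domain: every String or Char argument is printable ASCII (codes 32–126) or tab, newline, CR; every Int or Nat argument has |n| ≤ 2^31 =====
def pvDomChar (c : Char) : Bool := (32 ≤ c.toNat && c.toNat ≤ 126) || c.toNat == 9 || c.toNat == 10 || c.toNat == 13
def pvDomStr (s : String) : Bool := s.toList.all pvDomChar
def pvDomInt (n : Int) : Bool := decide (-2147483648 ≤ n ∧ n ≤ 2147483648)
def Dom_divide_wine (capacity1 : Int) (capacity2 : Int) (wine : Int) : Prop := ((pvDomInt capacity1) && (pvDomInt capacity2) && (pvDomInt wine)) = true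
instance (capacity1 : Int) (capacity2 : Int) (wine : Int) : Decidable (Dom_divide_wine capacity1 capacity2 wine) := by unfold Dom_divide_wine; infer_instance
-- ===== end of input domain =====

-- B replaces A's two unit-step while-loops by closed-form max(0, source - cap) arithmetic (objective: faster).

-- ===== PORT A =====
-- first while loop: while container2 > capacity1: container2 -= 1; container1 += 1
def pvPour1 (capacity1 : Int) (container1 : Int) (container2 : Int) : Int × Int :=
  if container2 > capacity1 then pvPour1 capacity1 (container1 + 1) (container2 - 1)
  else (container1, container2)
termination_by (container2 - capacity1).toNat
decreasing_by omega

-- second while loop: while container1 > capacity2: container1 -= 1; container2 += 1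
def pvPour2 (capacity2 : Int) (container1 : Int) (container2 : Int) : Int × Int :=
  if container1 > capacity2 then pvPour2 capacity2 (container1 - 1) (container2 + 1)
  else (container1, container2)
termination_by (container1 - capacity2).toNat
decreasing_by omega

def divide_wine (capacity1 : Int) (capacity2 : Int) (wine : Int) : List Int :=
  let container1 : Int := 0
  let container2 : Int := 0
  let container1 := wine
  let container2 := if container2 = 0 then capacity2 else container2
  let p := pvPour1 capacity1 container1 container2
  let p := pvPour2 capacity2 p.1 p.2
  [p.1, p.2]

-- ===== PORT B =====
def divide_wine_alt (capacity1 : Int) (capacity2 : Int) (wine : Int) : List Int :=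
  let t1 := max 0 (capacity2 - capacity1)
  let c1 := wine + t1
  let c2 := capacity2 - t1
  let t2 := max 0 (c1 - capacity2)
  [c1 - t2, c2 + t2]

-- ===== PRECONDITION & SPEC =====
def Spec_divide_wine (capacity1 : Int) (capacity2 : Int) (wine : Int) (out : List Int) : Prop := out = divide_wine_alt capacity1 capacity2 wine
instance (capacity1 : Int) (capacity2 : Int) (wine : Int) (out : List Int) : Decidable (Spec_divide_wine capacity1 capacity2 wine out) := by unfold Spec_divide_wine; infer_instance

-- ===== CLAIM (what is proved, stated in full; the proofs are below) =====
def Claim_equal_divide_wine : Prop := ∀ (capacity1 : Int) (capacity2 : Int) (wine : Int), Dom_divide_wine capacity1 capacity2 wine → Spec_divide_wine capacity1 capacity2 wine (divide_wine capacity1 capacity2 wine)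

-- ===== LEMMAS AND PROOFS =====
theorem pvPour1_eq (capacity1 container1 container2 : Int) :
    pvPour1 capacity1 container1 container2 =
      (container1 + max 0 (container2 - capacity1), container2 - max 0 (container2 - capacity1)) := by
  fun_induction pvPour1 with
  | case1 c1 c2 h ih =>
    rw [ih]
    simp only [Prod.mk.injEq]
    omega
  | case2 c1 c2 h =>
    simp only [Prod.mk.injEq]
    omega

theorem pvPour2_eq (capacity2 container1 container2 : Int) :
    pvPour2 capacity2 container1 container2 =
      (container1 - max 0 (container1 - capacity2), container2 + max 0 (container1 - capacity2)) := by
  fun_induction pvPour2 with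
  | case1 c1 c2 h ih =>
    rw [ih]
    simp only [Prod.mk.injEq]
    omega
  | case2 c1 c2 h =>
    simp only [Prod.mk.injEq]
    omega

-- ===== VERDICT (by name: the statement is the Claim_ definition above) =====
theorem divide_wine_spec : Claim_equal_divide_wine := by
  intro capacity1 capacity2 wine _
  unfold Spec_divide_wine divide_wine divide_wine_alt
  simp only [pvPour1_eq, pvPour2_eq, List.cons.injEq, and_true, Int.max_def]
  split_ifs <;> omega
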